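-- pv_equiv track=rewrite | github.com/barawn/pueo-python | pueo/turfio/pueo_cinalign.py | process_eyescan_rxclk
-- ===== SOURCE A (Python) =====
-- def process_eyescan_rxclk(scan, width=448, wrap=True):
--     scanShift = 0
--     if wrap:
--         if scan[0] == 0:
--             scanShift = next((i for i, x in enumerate(scan[::-1]) if x), None)
--             # roll the scan, then adjust back
--             scan = scan[-1*scanShift:] + scan[:-1*scanShift]
--
--     # We start off by assuming we're not in an eye.
--     in_eye = False
--     eye_start = 0
--     eyes = []
--     for i in range(width):
--         if scan[i] == 0 and not in_eye:
--             eye_start = i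
--             in_eye = True
--         elif scan[i] > 0 and in_eye:
--             eye = [ int(eye_start+(i-eye_start)/2), i-eye_start ]
--             # now adjust it
--             if scanShift != 0:
--                 eyePos = eye[0]
--                 eyePos -= scanShift
--                 if eyePos < 0:
--                     eyePos += width
--                 eye = [ eyePos , i-eye_start ]
--             eyes.append(eye)
--             in_eye = False
--     # we exited the loop without finding the end of the eye
--     if in_eye:
--         eye = [ int(eye_start+(width-eye_start)/2), width-eye_start ]
--         eyes.append( eye )
--
--     return eyes
-- ===== SOURCE B (Python) =====
-- def process_eyescan_rxclk(scan, width=448, wrap=True):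
--     scanShift = 0
--     if wrap:
--         if scan[0] == 0:
--             scanShift = next((i for i, x in enumerate(scan[::-1]) if x), None)
--             scan = scan[-1*scanShift:] + scan[:-1*scanShift]
--
--     window = [scan[i] for i in range(width)]
--
--     def centered(start, end):
--         # eye center in original (pre-roll) coordinates, with its width
--         pos = start + (end - start) // 2 - scanShift
--         if pos < 0:
--             pos += width
--         return [pos, end - start]
--
--     # search-based pass: an eye opens at the next zero sample and is
--     # terminated by the next strictly positive sample after it
--     eyes = []
--     i = 0
--     while True:
--         try:
--             start = window.index(0, i)
--         except ValueError:
--             break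
--         end = next((j for j in range(start + 1, width) if window[j] > 0), width)
--         eyes.append(centered(start, end))
--         if end == width:
--             break
--         i = end + 1
--     return eyes
-- ===== Notes on version B (the rewrite author's own statement) =====
-- stated objective: alternative
-- what changed: Replaces A's per-sample in_eye boolean state machine with a search-based pass: repeatedly locate the next zero sample (list.index) as the eye opening and the next strictly positive sample after it as its terminator, and place every eye through one uniform wrap-back helper.
-- intended difference: On scans that were rolled nontrivially (wrap, first sample zero, trailing zeros, shift not equal to width) whose scanned window ends inside an open eye, A reports that final eye's center in rolled coordinates because it forgets the scanShift wrap-back it applies to every other eye, while B adjusts uniformly and reports the center in the original pre-roll coordinates (at the witness, center 2 instead of A's center 1 for the same eye of width 3), which is the intended value. — e.g. on process_eyescan_rxclk([0, 1, 0, 0], 3, true): A returns [[1, 3]], B returns [[2, 3]]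
import Mathlib
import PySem

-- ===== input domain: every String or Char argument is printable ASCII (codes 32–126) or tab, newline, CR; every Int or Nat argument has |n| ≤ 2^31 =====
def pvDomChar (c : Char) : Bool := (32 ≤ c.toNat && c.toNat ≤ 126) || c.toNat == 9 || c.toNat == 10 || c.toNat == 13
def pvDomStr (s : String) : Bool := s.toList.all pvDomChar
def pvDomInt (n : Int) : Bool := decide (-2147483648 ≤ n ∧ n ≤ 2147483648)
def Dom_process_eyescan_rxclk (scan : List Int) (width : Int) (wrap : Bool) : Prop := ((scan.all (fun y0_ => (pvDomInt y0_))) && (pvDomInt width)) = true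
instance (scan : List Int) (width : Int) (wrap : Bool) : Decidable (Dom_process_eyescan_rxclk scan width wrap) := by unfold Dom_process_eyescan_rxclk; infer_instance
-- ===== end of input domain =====

-- B replaces A's per-sample in_eye state machine by a search-based pass (next zero opens an
-- eye, next positive sample after it closes it) with one uniform wrap-back placement helper;
-- B intentionally differs from A on the final unterminated eye of a rolled scan (see D_ below).

-- ===== PORT A =====
-- shared preamble: both Pythons start with the byte-identical 'wrap'/'scanShift' roll.
-- On inputs excluded by Pre_ (empty scan with wrap: IndexError; all-zero scan with wrap:
-- scanShift = None, TypeError) the Python raises; the '.getD 0' defaults are never reached under Pre_.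
def pvPrep (scan : List Int) (wrap : Bool) : Int × List Int :=
  if wrap && ((PySem.List.pyGet? scan 0).getD 0 == 0) then
    let s : Int := ((PySem.List.enumerate scan.reverse 0).findSome?
        (fun p => if p.2 ≠ 0 then some p.1 else none)).getD 0
    (s, PySem.List.slice scan (some (-1*s)) none ++ PySem.List.slice scan none (some (-1*s)))
  else (0, scan)

-- eye = [int(eye_start + span/2), span] then the scanShift wrap-back adjustment; the Python
-- float arithmetic 'int(es + span/2)' is exact floor division here (non-negative ints ≤ 2^31 < 2^52).
def pvAdjEye (width scanShift eye_start span : Int) : List Int :=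
  let eye0 := eye_start + PySem.Int.floordiv span 2
  if scanShift ≠ 0 then
    let eyePos := eye0 - scanShift
    [if eyePos < 0 then eyePos + width else eyePos, span]
  else [eye0, span]

-- the body of A's 'for i in range(width)' loop; state = (in_eye, eye_start, eyes)
def pvStepA (width scanShift : Int) (scan2 : List Int)
    (st : Bool × Int × List (List Int)) (i : Int) : Bool × Int × List (List Int) :=
  let v := PySem.List.pyGetD scan2 i 0   -- scan[i]; in range under Pre_
  if v == 0 && !st.1 then (true, i, st.2.2)
  else if decide (v > 0) && st.1 then
    (false, st.2.1, st.2.2 ++ [pvAdjEye width scanShift st.2.1 (i - st.2.1)])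
  else st

-- final 'if in_eye:' trailing-eye append
def pvPostA (width : Int) (st : Bool × Int × List (List Int)) : List (List Int) :=
  if st.1 then
    st.2.2 ++ [[st.2.1 + PySem.Int.floordiv (width - st.2.1) 2, width - st.2.1]]
  else st.2.2

def process_eyescan_rxclk (scan : List Int) (width : Int) (wrap : Bool) : List (List Int) :=
  let p := pvPrep scan wrap
  pvPostA width ((PySem.List.pyRange 0 width 1).foldl (pvStepA width p.1 p.2) (false, 0, []))

-- ===== PORT B =====
-- Source B's 'centered(start, end)' helper: eye center with uniform wrap-back
def pvCentered (width scanShift start e : Int) : List Int :=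
  let pos := start + PySem.Int.floordiv (e - start) 2 - scanShift
  [if pos < 0 then pos + width else pos, e - start]

-- 'next((j for j in range(start+1, width) if window[j] > 0), width)'; fuel makes the
-- scan structural (call sites pass fuel = (width - j).toNat, enough for the whole range)
def pvFindPos (window : List Int) (width : Int) : Nat → Int → Int
  | 0, _ => width
  | fuel + 1, j =>
    if j < width then
      (if 0 < PySem.List.pyGetD window j 0 then j else pvFindPos window width fuel (j + 1))
    else width

-- Source B's while-loop: i = lower bound of the zero search; 'window.index(0, i)' is
-- index? on window.drop i; fuel (one unit per iteration, window.length + 1 suffices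
-- since i strictly increases) makes the loop structural
def pvLoopB (width s : Int) (window : List Int) : Nat → Nat → List (List Int)
  | 0, _ => []
  | fuel + 1, i =>
    match PySem.List.index? (window.drop i) 0 with
    | none => []
    | some j =>
      let start : Int := (i : Int) + (j : Int)
      let e := pvFindPos window width ((width - (start + 1)).toNat) (start + 1)
      if e == width then [pvCentered width s start e]
      else pvCentered width s start e :: pvLoopB width s window fuel (e.toNat + 1)

def process_eyescan_rxclk_alt (scan : List Int) (width : Int) (wrap : Bool) : List (List Int) :=
  let p := pvPrep scan wrap
  let window := (PySem.List.pyRange 0 width 1).map (fun i => PySem.List.pyGetD p.2 i 0)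
  pvLoopB width p.1 window (window.length + 1) 0

-- ===== PRECONDITION & SPEC =====
-- Pre_ excludes exactly the inputs where the Python A raises: width > len(scan)
-- (IndexError in the loop), and with wrap an empty scan (IndexError on scan[0]) or an
-- all-zero scan (scanShift = None, TypeError on the roll).
def Pre_process_eyescan_rxclk (scan : List Int) (width : Int) (wrap : Bool) : Prop :=
  width ≤ (scan.length : Int) ∧
  (wrap = true → scan ≠ [] ∧ (scan.head? = some 0 → ∃ x ∈ scan, x ≠ 0))
instance (scan : List Int) (width : Int) (wrap : Bool) : Decidable (Pre_process_eyescan_rxclk scan width wrap) := by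
  unfold Pre_process_eyescan_rxclk; infer_instance

def pvWitness_process_eyescan_rxclk : List Int × Int × Bool := ([1, 0, 0, 1], 4, true)

-- number of trailing zeros of the scan = A's/B's scanShift (when the roll fires)
def pvTrail (scan : List Int) : Nat := (scan.reverse.takeWhile (fun x => x == 0)).length
-- the first 'width' samples of the rolled scan
def pvWindowD (scan : List Int) (width : Int) : List Int :=
  let t := pvTrail scan
  ((scan.drop (scan.length - t)) ++ (scan.take (scan.length - t))).take width.toNat

-- On scans that were rolled nontrivially (wrap, scan[0]==0, trailing zeros) whose scanned
-- window ends inside an open eye (reading the window backwards, the first sample ≥ 0 is a 0),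
-- A reports that final eye's center in rolled coordinates — it forgets the scanShift wrap-back
-- it applies to every other eye — while B adjusts uniformly and reports the center in the
-- original coordinates, which is the intended value (the no-op case scanShift = width excluded).
def D_process_eyescan_rxclk (scan : List Int) (width : Int) (wrap : Bool) : Prop :=
  wrap = true ∧ scan.head? = some 0 ∧ pvTrail scan ≠ 0 ∧ (pvTrail scan : Int) ≠ width ∧
  ((pvWindowD scan width).reverse.find? (fun v => decide (0 ≤ v)) = some 0)
instance (scan : List Int) (width : Int) (wrap : Bool) : Decidable (D_process_eyescan_rxclk scan width wrap) := by
  unfold D_process_eyescan_rxclk; infer_instance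

def Spec_process_eyescan_rxclk (scan : List Int) (width : Int) (wrap : Bool) (out : List (List Int)) : Prop := ¬ D_process_eyescan_rxclk scan width wrap → out = process_eyescan_rxclk_alt scan width wrap
instance (scan : List Int) (width : Int) (wrap : Bool) (out : List (List Int)) : Decidable (Spec_process_eyescan_rxclk scan width wrap out) := by unfold Spec_process_eyescan_rxclk; infer_instance

def pvDiffWitness_process_eyescan_rxclk : List Int × Int × Bool := ([0, 1, 0, 0], 3, true)
def pvDiffWitnessOut_process_eyescan_rxclk : (List (List Int)) × (List (List Int)) := ([[1, 3]], [[2, 3]])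

-- ===== CLAIM (what is proved, stated in full; the proofs are below) =====
def Claim_unchanged_process_eyescan_rxclk : Prop := ∀ (scan : List Int) (width : Int) (wrap : Bool), Dom_process_eyescan_rxclk scan width wrap → Pre_process_eyescan_rxclk scan width wrap → Spec_process_eyescan_rxclk scan width wrap (process_eyescan_rxclk scan width wrap)
def Claim_changed_process_eyescan_rxclk : Prop := Dom_process_eyescan_rxclk (pvDiffWitness_process_eyescan_rxclk.1) (pvDiffWitness_process_eyescan_rxclk.2.1) (pvDiffWitness_process_eyescan_rxclk.2.2) ∧ Pre_process_eyescan_rxclk (pvDiffWitness_process_eyescan_rxclk.1) (pvDiffWitness_process_eyescan_rxclk.2.1) (pvDiffWitness_process_eyescan_rxclk.2.2) ∧ D_process_eyescan_rxclk (pvDiffWitness_process_eyescan_rxclk.1) (pvDiffWitness_process_eyescan_rxclk.2.1) (pvDiffWitness_process_eyescan_rxclk.2.2) ∧ process_eyescan_rxclk (pvDiffWitness_process_eyescan_rxclk.1) (pvDiffWitness_process_eyescan_rxclk.2.1) (pvDiffWitness_process_eyescan_rxclk.2.2) = pvDiffWitnessOut_process_eyescan_rxclk.1 ∧ process_eyescan_rxclk_alt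 (pvDiffWitness_process_eyescan_rxclk.1) (pvDiffWitness_process_eyescan_rxclk.2.1) (pvDiffWitness_process_eyescan_rxclk.2.2) = pvDiffWitnessOut_process_eyescan_rxclk.2 ∧ pvDiffWitnessOut_process_eyescan_rxclk.1 ≠ pvDiffWitnessOut_process_eyescan_rxclk.2
def Claim_exact_process_eyescan_rxclk : Prop := ∀ (scan : List Int) (width : Int) (wrap : Bool), Dom_process_eyescan_rxclk scan width wrap → Pre_process_eyescan_rxclk scan width wrap → D_process_eyescan_rxclk scan width wrap → process_eyescan_rxclk scan width wrap ≠ process_eyescan_rxclk_alt scan width wrap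

-- ===== LEMMAS AND PROOFS =====

-- The common core of both programs, as a state machine over the window with a parametric
-- closed-eye emission 'emit es i' and a parametric trailing-eye finalizer 'fin es'.
def pvRec (emit : Int → Int → List Int) (fin : Int → List Int) :
    List Int → Int → Bool → Int → List (List Int)
  | [], _, b, es => if b then [fin es] else []
  | v :: rest, i, b, es =>
    if v = 0 ∧ b = false then pvRec emit fin rest (i + 1) true i
    else if 0 < v ∧ b = true then emit es i :: pvRec emit fin rest (i + 1) false es
    else pvRec emit fin rest (i + 1) b es

def pvEmitA (W s es i : Int) : List Int := pvAdjEye W s es (i - es)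
def pvFinA (W es : Int) : List Int := [es + PySem.Int.floordiv (W - es) 2, W - es]
def pvEmitB (W s es e : Int) : List Int := pvCentered W s es e
def pvFinB (W s es : Int) : List Int := pvCentered W s es W

-- the in_eye flag at the end of the window
def pvEndFlag : List Int → Bool → Bool
  | [], b => b
  | v :: rest, b => pvEndFlag rest (if v = 0 then true else if 0 < v then false else b)

-- ---------- generic pvRec lemmas ----------

theorem pvFlagStep (v : Int) (b : Bool) (h0 : ¬(v = 0 ∧ b = false)) (h2 : ¬(0 < v ∧ b = true)) :
    (if v = 0 then true else if 0 < v then false else b) = b := by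
  cases b with
  | false =>
    have hv : v ≠ 0 := fun hv => h0 ⟨hv, rfl⟩
    simp [hv]
  | true =>
    have hv : ¬ 0 < v := fun hp => h2 ⟨hp, rfl⟩
    rcases eq_or_ne v 0 with h | h <;> simp [h, hv]

theorem pvRec_congr (emit1 emit2 : Int → Int → List Int) (fin1 fin2 : Int → List Int) :
    ∀ (xs : List Int) (i : Int) (b : Bool) (es : Int),
      (b = true → fin1 es = fin2 es ∧ ∀ e, i ≤ e → e ≤ i + xs.length → emit1 es e = emit2 es e) →
      (∀ s' e, i ≤ s' → s' < e → e ≤ i + xs.length → emit1 s' e = emit2 s' e) →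
      (∀ s', i ≤ s' → s' < i + xs.length → fin1 s' = fin2 s') →
      pvRec emit1 fin1 xs i b es = pvRec emit2 fin2 xs i b es := by
  intro xs
  induction xs with
  | nil =>
    intro i b es hb _ _
    cases b with
    | false => simp [pvRec]
    | true => simp [pvRec, (hb rfl).1]
  | cons v rest ih =>
    intro i b es hb hx hf
    have hlen : i + ((v :: rest).length : Int) = (i + 1) + (rest.length : Int) := by
      simp; ring
    have hpos : (0:Int) < ((v :: rest).length : Int) := by
      simp
    by_cases h0 : v = 0 ∧ b = false
    · rw [pvRec, pvRec, if_pos h0, if_pos h0]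
      exact ih (i + 1) true i
        (fun _ => ⟨hf i (le_refl i) (by omega),
          fun e he1 he2 => hx i e (le_refl i) (by omega) (by omega)⟩)
        (fun s' e h1 h2 h3 => hx s' e (by omega) h2 (by omega))
        (fun s' h1 h2 => hf s' (by omega) (by omega))
    · by_cases h2 : 0 < v ∧ b = true
      · rw [pvRec, pvRec, if_neg h0, if_neg h0, if_pos h2, if_pos h2]
        have hemit := (hb h2.2).2 i (le_refl i) (by omega)
        rw [hemit]
        congr 1
        exact ih (i + 1) false es (by simp)
          (fun s' e h1 h2 h3 => hx s' e (by omega) h2 (by omega))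
          (fun s' h1 h2 => hf s' (by omega) (by omega))
      · rw [pvRec, pvRec, if_neg h0, if_neg h0, if_neg h2, if_neg h2]
        exact ih (i + 1) b es
          (fun hbt => ⟨(hb hbt).1, fun e he1 he2 => (hb hbt).2 e (by omega) (by omega)⟩)
          (fun s' e h1 h2 h3 => hx s' e (by omega) h2 (by omega))
          (fun s' h1 h2 => hf s' (by omega) (by omega))

-- the finalizer is irrelevant when the window does not end inside an eye
theorem pvRec_fin_irrel (emit : Int → Int → List Int) (fin1 fin2 : Int → List Int) :
    ∀ (xs : List Int) (b : Bool) (i es : Int), pvEndFlag xs b = false →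
      pvRec emit fin1 xs i b es = pvRec emit fin2 xs i b es := by
  intro xs
  induction xs with
  | nil =>
    intro b i es h
    simp [pvEndFlag] at h
    simp [pvRec, h]
  | cons v rest ih =>
    intro b i es h
    rw [pvEndFlag] at h
    by_cases h0 : v = 0 ∧ b = false
    · have harg : (if v = 0 then true else if 0 < v then false else b) = true := by
        simp [h0.1]
      rw [harg] at h
      rw [pvRec, pvRec, if_pos h0, if_pos h0]
      exact ih true (i + 1) i h
    · by_cases h2 : 0 < v ∧ b = true
      · have harg : (if v = 0 then true else if 0 < v then false else b) = false := by
          have : v ≠ 0 := by omega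
          simp [this, h2.1]
        rw [harg] at h
        rw [pvRec, pvRec, if_neg h0, if_neg h0, if_pos h2, if_pos h2]
        congr 1
        exact ih false (i + 1) es h
      · rw [pvFlagStep v b h0 h2] at h
        rw [pvRec, pvRec, if_neg h0, if_neg h0, if_neg h2, if_neg h2]
        exact ih b (i + 1) es h

-- when the window DOES end inside an eye, the result is a common prefix plus [fin es']
theorem pvRec_last (emit : Int → Int → List Int) :
    ∀ (xs : List Int) (b : Bool) (i es : Int), pvEndFlag xs b = true →
      ∃ es' L, ∀ fin : Int → List Int, pvRec emit fin xs i b es = L ++ [fin es'] := by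
  intro xs
  induction xs with
  | nil =>
    intro b i es h
    simp [pvEndFlag] at h
    exact ⟨es, [], fun fin => by simp [pvRec, h]⟩
  | cons v rest ih =>
    intro b i es h
    rw [pvEndFlag] at h
    by_cases h0 : v = 0 ∧ b = false
    · have harg : (if v = 0 then true else if 0 < v then false else b) = true := by
        simp [h0.1]
      rw [harg] at h
      obtain ⟨es', L, hL⟩ := ih true (i + 1) i h
      exact ⟨es', L, fun fin => by rw [pvRec, if_pos h0]; exact hL fin⟩
    · by_cases h2 : 0 < v ∧ b = true
      · have harg : (if v = 0 then true else if 0 < v then false else b) = false := by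
          have : v ≠ 0 := by omega
          simp [this, h2.1]
        rw [harg] at h
        obtain ⟨es', L, hL⟩ := ih false (i + 1) es h
        exact ⟨es', emit es i :: L, fun fin => by
          rw [pvRec, if_neg h0, if_pos h2, hL fin]; simp⟩
      · rw [pvFlagStep v b h0 h2] at h
        obtain ⟨es', L, hL⟩ := ih b (i + 1) es h
        exact ⟨es', L, fun fin => by rw [pvRec, if_neg h0, if_neg h2]; exact hL fin⟩

theorem pvRec_skip_nonzero (emit : Int → Int → List Int) (fin : Int → List Int) :
    ∀ (pre : List Int), (0 : Int) ∉ pre →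
      ∀ (rest : List Int) (i es : Int),
        pvRec emit fin (pre ++ rest) i false es = pvRec emit fin rest (i + pre.length) false es := by
  intro pre
  induction pre with
  | nil => intro _ rest i es; simp
  | cons v t ih =>
    intro h rest i es
    have hv : v ≠ 0 := fun hv => h (by simp [hv])
    calc pvRec emit fin ((v :: t) ++ rest) i false es
        = pvRec emit fin (t ++ rest) (i + 1) false es := by
          rw [List.cons_append, pvRec, if_neg (by simp [hv]), if_neg (by simp)]
      _ = pvRec emit fin rest (i + 1 + (t.length : Int)) false es :=
          ih (fun hx => h (by simp [hx])) rest (i + 1) es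
      _ = pvRec emit fin rest (i + ((v :: t).length : Int)) false es := by
          congr 1; simp; ring

theorem pvRec_skip_nonpos (emit : Int → Int → List Int) (fin : Int → List Int) :
    ∀ (pre : List Int), (∀ x ∈ pre, ¬ (0 : Int) < x) →
      ∀ (rest : List Int) (i es : Int),
        pvRec emit fin (pre ++ rest) i true es = pvRec emit fin rest (i + pre.length) true es := by
  intro pre
  induction pre with
  | nil => intro _ rest i es; simp
  | cons v t ih =>
    intro h rest i es
    have hv : ¬ (0 : Int) < v := h v (by simp)
    calc pvRec emit fin ((v :: t) ++ rest) i true es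
        = pvRec emit fin (t ++ rest) (i + 1) true es := by
          rw [List.cons_append, pvRec, if_neg (by simp), if_neg (by simp [hv])]
      _ = pvRec emit fin rest (i + 1 + (t.length : Int)) true es :=
          ih (fun x hx => h x (by simp [hx])) rest (i + 1) es
      _ = pvRec emit fin rest (i + ((v :: t).length : Int)) true es := by
          congr 1; simp; ring

theorem pvRec_no_zero (emit : Int → Int → List Int) (fin : Int → List Int) :
    ∀ (xs : List Int), (0 : Int) ∉ xs → ∀ (i es : Int),
      pvRec emit fin xs i false es = [] := by
  intro xs h i es
  have := pvRec_skip_nonzero emit fin xs h [] i es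
  simpa [pvRec] using this

-- ---------- pvEndFlag vs the declarative find? condition of D_ ----------

theorem pvEndFlag_append (xs ys : List Int) (b : Bool) :
    pvEndFlag (xs ++ ys) b = pvEndFlag ys (pvEndFlag xs b) := by
  induction xs generalizing b with
  | nil => simp [pvEndFlag]
  | cons v t ih => rw [List.cons_append, pvEndFlag, pvEndFlag, ih]

theorem pvEndFlag_eq_find (xs : List Int) (b : Bool) :
    pvEndFlag xs b = (match xs.reverse.find? (fun v => decide ((0:Int) ≤ v)) with
      | some v => decide (v = 0)
      | none => b) := by
  induction xs using List.reverseRecOn generalizing b with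
  | nil => simp [pvEndFlag]
  | append_singleton t v ih =>
    rw [pvEndFlag_append]
    simp only [List.reverse_append, List.reverse_cons, List.reverse_nil, List.nil_append,
      List.cons_append, List.find?_cons]
    rcases lt_trichotomy v 0 with hv | hv | hv
    · rw [show decide ((0:Int) ≤ v) = false by simp; omega]
      rw [show pvEndFlag [v] (pvEndFlag t b) = pvEndFlag t b by
        have h1 : decide (v = 0) = false := by simp; omega
        have h2 : decide ((0:Int) < v) = false := by simp; omega
        simp [pvEndFlag, h1, h2]]
      exact ih b
    · subst hv
      rw [show decide ((0:Int) ≤ 0) = true by simp]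
      simp [pvEndFlag]
    · rw [show decide ((0:Int) ≤ v) = true by simp; omega]
      have h1 : decide (v = 0) = false := by simp; omega
      have h2 : decide ((0:Int) < v) = true := by simp; omega
      simp [pvEndFlag, h1, h2]

-- ---------- A's fold is pvRec with A's emission and finalizer ----------

theorem pvRec_fold (W s : Int) (ys : List Int) :
    ∀ (xs : List Int) (i : Int) (in_eye : Bool) (es : Int) (acc : List (List Int)),
      (∀ (k : Nat) (hk : k < xs.length), PySem.List.pyGetD ys (i + (k : Int)) 0 = xs[k]) →
      pvPostA W ((PySem.List.pyRange i (i + xs.length) 1).foldl (pvStepA W s ys) (in_eye, es, acc))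
        = acc ++ pvRec (pvEmitA W s) (pvFinA W) xs i in_eye es := by
  intro xs
  induction xs with
  | nil =>
    intro i in_eye es acc _
    rw [PySem.List.pyRange_one_eq_nil (by simp)]
    cases in_eye <;> simp [pvPostA, pvRec, pvFinA]
  | cons v rest ih =>
    intro i in_eye es acc H
    have h1 : i + ((v :: rest).length : Int) = (i + 1) + (rest.length : Int) := by
      simp; ring
    rw [h1, PySem.List.pyRange_one_cons (by omega)]
    have hv : PySem.List.pyGetD ys i 0 = v := by
      have := H 0 (by simp)
      simpa using this
    have H' : ∀ (k : Nat) (hk : k < rest.length),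
        PySem.List.pyGetD ys ((i + 1) + (k : Int)) 0 = rest[k] := by
      intro k hk
      have := H (k + 1) (by simpa using Nat.succ_lt_succ hk)
      simpa [add_assoc, add_comm, add_left_comm] using this
    simp only [List.foldl_cons]
    by_cases h0 : v = 0 ∧ in_eye = false
    · have hstep : pvStepA W s ys (in_eye, es, acc) i = (true, i, acc) := by
        simp [pvStepA, hv, h0.1, h0.2]
      rw [hstep, ih (i + 1) true i acc H', pvRec, if_pos h0]
    · by_cases h2 : 0 < v ∧ in_eye = true
      · have hstep : pvStepA W s ys (in_eye, es, acc) i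
            = (false, es, acc ++ [pvAdjEye W s es (i - es)]) := by
          simp [pvStepA, hv, h2.1, h2.2]
        rw [hstep, ih (i + 1) false es _ H', pvRec, if_neg h0, if_pos h2]
        simp [pvEmitA]
      · have hstep : pvStepA W s ys (in_eye, es, acc) i = (in_eye, es, acc) := by
          rcases Bool.eq_false_or_eq_true in_eye with hb | hb
          · have hnp : ¬ (0 < v) := by
              intro h; exact h2 ⟨h, hb⟩
            rcases eq_or_ne v 0 with h | h
            · simp [pvStepA, hv, h, hb]
            · simp [pvStepA, hv, hb, hnp]
          · have hne : ¬ (v = 0) := by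
              intro h; exact h0 ⟨h, hb⟩
            simp [pvStepA, hv, hne, hb]
        rw [hstep, ih (i + 1) in_eye es acc H', pvRec, if_neg h0, if_neg h2]

theorem pvA_eq (W s : Int) (ys : List Int) :
    pvPostA W ((PySem.List.pyRange 0 W 1).foldl (pvStepA W s ys) (false, 0, []))
      = pvRec (pvEmitA W s) (pvFinA W)
          ((PySem.List.pyRange 0 W 1).map (fun i => PySem.List.pyGetD ys i 0)) 0 false 0 := by
  by_cases hw : W ≤ 0
  · rw [PySem.List.pyRange_one_eq_nil hw]
    simp [pvPostA, pvRec]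
  · have H : ∀ (k : Nat) (hk : k < ((PySem.List.pyRange 0 W 1).map (fun i => PySem.List.pyGetD ys i 0)).length),
        PySem.List.pyGetD ys ((0 : Int) + (k : Int)) 0
          = ((PySem.List.pyRange 0 W 1).map (fun i => PySem.List.pyGetD ys i 0))[k] := by
      intro k hk
      rw [List.getElem_map]
      congr 1
      rw [PySem.List.getElem_pyRange_one]
    have hrange : PySem.List.pyRange 0 W 1
        = PySem.List.pyRange 0 (0 + (((PySem.List.pyRange 0 W 1).map (fun i => PySem.List.pyGetD ys i 0)).length : Int)) 1 := by
      congr 1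
      simp [PySem.List.length_pyRange_one]
      omega
    conv_lhs => rw [hrange]
    rw [pvRec_fold W s ys _ 0 false 0 [] H]
    simp

-- ---------- B's loop is pvRec with B's emission and finalizer ----------

theorem pvFindPos_spec (window : List Int) (W : Int) (hW : (window.length : Int) = W) :
    ∀ (fuel : Nat) (j : Nat), (W - (j : Int)).toNat ≤ fuel →
      pvFindPos window W fuel (j : Int)
        = (match (window.drop j).findIdx? (fun x => decide ((0:Int) < x)) with
            | some k => (((j + k : Nat)) : Int)
            | none => W) := by
  intro fuel
  induction fuel with
  | zero =>
    intro j hj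
    have hge : window.length ≤ j := by omega
    rw [List.drop_eq_nil_of_le hge]
    simp [pvFindPos]
  | succ fuel ih =>
    intro j hj
    by_cases hlt : (j : Int) < W
    · have hjl : j < window.length := by omega
      have hdrop : window.drop j = window[j] :: window.drop (j + 1) :=
        (List.getElem_cons_drop hjl).symm
      rw [pvFindPos, if_pos hlt]
      have hget : PySem.List.pyGetD window (j : Int) 0 = window[j] := by
        simp [PySem.List.pyGetD_natCast, List.getD_eq_getElem?_getD, List.getElem?_eq_getElem hjl]
      rw [hget, hdrop, List.findIdx?_cons]
      by_cases hp : (0:Int) < window[j]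
      · simp [hp]
      · rw [if_neg hp]
        have := ih (j + 1) (by omega)
        rw [show ((j : Int) + 1) = (((j + 1 : Nat)) : Int) by push_cast; ring, this]
        simp only [hp, decide_false]
        cases hfi : (window.drop (j + 1)).findIdx? (fun x => decide ((0:Int) < x)) with
        | none => simp
        | some k => simp; push_cast; ring
    · have hge : window.length ≤ j := by omega
      rw [List.drop_eq_nil_of_le hge]
      rw [pvFindPos, if_neg hlt]
      simp

theorem pvLoopB_eq (W s : Int) (window : List Int) (hW : (window.length : Int) = W) :
    ∀ (fuel : Nat) (i : Nat) (es : Int), window.length + 1 - i ≤ fuel →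
      pvLoopB W s window fuel i
        = pvRec (pvEmitB W s) (pvFinB W s) (window.drop i) (i : Int) false es := by
  intro fuel
  induction fuel with
  | zero =>
    intro i es hfuel
    rw [List.drop_eq_nil_of_le (by omega)]
    simp [pvLoopB, pvRec]
  | succ fuel ih =>
    intro i es hfuel
    rw [pvLoopB]
    cases hidx : PySem.List.index? (window.drop i) 0 with
    | none =>
      have h0 : (0:Int) ∉ window.drop i := (PySem.List.index?_eq_none_iff _ _).mp hidx
      rw [pvRec_no_zero _ _ _ h0]
    | some j =>
      obtain ⟨pre, suf, hps, hprelen, hprenotin⟩ :=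
        (PySem.List.index?_eq_some_iff _ 0 j).mp hidx
      have hjlen : j < (window.drop i).length := by
        rw [hps, hprelen.symm]; simp
      have hil : i + j < window.length := by
        rw [List.length_drop] at hjlen; omega
      have hsuf : suf = window.drop (i + j + 1) := by
        have h1 : window.drop (i + (j + 1)) = (window.drop i).drop (j + 1) := by
          rw [List.drop_drop]; try congr 1; try omega
        rw [show i + j + 1 = i + (j + 1) by omega, h1, hps, ← hprelen, List.drop_append]
        simp
      have hstart : ((i : Int) + (j : Int)) = (((i + j : Nat)) : Int) := by push_cast; ring
      have hstart1 : ((i : Int) + (j : Int) + 1) = (((i + j + 1 : Nat)) : Int) := by push_cast; ring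
      -- the machine side: walk pre (no zeros), open the eye at i+j
      have hmach : pvRec (pvEmitB W s) (pvFinB W s) (window.drop i) (i : Int) false es
          = pvRec (pvEmitB W s) (pvFinB W s) suf (((i + j + 1 : Nat)) : Int) true (((i + j : Nat)) : Int) := by
        rw [hps, pvRec_skip_nonzero _ _ pre hprenotin, hprelen]
        rw [pvRec, if_pos ⟨rfl, rfl⟩]
        congr 1 <;> push_cast <;> ring
      rw [hmach]
      dsimp only
      -- the search side
      have hfp := pvFindPos_spec window W hW ((W - ((i + j + 1 : Nat) : Int)).toNat) (i + j + 1) (le_refl _)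
      rw [show ((i:Int) + (j:Int) + 1) = (((i + j + 1 : Nat)) : Int) from hstart1]
      cases hfi : (window.drop (i + j + 1)).findIdx? (fun x => decide ((0:Int) < x)) with
      | none =>
        -- no terminator: trailing eye
        have he : pvFindPos window W ((W - (((i + j + 1 : Nat)) : Int)).toNat) (((i + j + 1 : Nat)) : Int) = W := by
          rw [hfp, hfi]
        rw [he]
        have hsufnp : ∀ x ∈ suf, ¬ (0:Int) < x := by
          intro x hx
          rw [hsuf] at hx
          obtain ⟨m, hm, hxm⟩ := List.mem_iff_getElem.mp hx
          have := List.findIdx?_eq_none_iff.mp hfi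
          have h2 := this ((window.drop (i + j + 1))[m]) (by exact List.getElem_mem hm)
          rw [hxm] at h2
          simpa using h2
        have hfin : pvRec (pvEmitB W s) (pvFinB W s) suf (((i + j + 1 : Nat)) : Int) true (((i + j : Nat)) : Int)
            = [pvFinB W s (((i + j : Nat)) : Int)] := by
          have h3 := pvRec_skip_nonpos (pvEmitB W s) (pvFinB W s) suf hsufnp [] (((i + j + 1 : Nat)) : Int) (((i + j : Nat)) : Int)
          rw [List.append_nil] at h3
          rw [h3, pvRec]
          simp
        rw [hfin, if_pos (show (W == W) = true by simp), hstart]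
        simp only [pvFinB]
      | some k =>
        -- terminator at absolute index i+j+1+k
        subst hsuf
        have hfi' : (window.drop (i + j + 1)).findIdx? (fun x => decide ((0:Int) < x)) = some k := hfi
        have hk : k < (window.drop (i + j + 1)).length := (List.findIdx?_eq_some_iff_findIdx_eq.mp hfi').1
        have hkw : i + j + 1 + k < window.length := by
          rw [List.length_drop] at hk; omega
        have hkp : (0:Int) < (window.drop (i + j + 1))[k] := by
          have := List.findIdx?_eq_some_iff_getElem.mp hfi'
          obtain ⟨_, hp, _⟩ := this
          simpa using hp
        have hkmin : ∀ m (hm : m < k), ¬ (0:Int) < (window.drop (i + j + 1))[m]'(by omega) := by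
          have := List.findIdx?_eq_some_iff_getElem.mp hfi'
          obtain ⟨_, _, hmin⟩ := this
          intro m hm
          have h2 := hmin m hm
          simpa using h2
        have he : pvFindPos window W ((W - (((i + j + 1 : Nat)) : Int)).toNat) (((i + j + 1 : Nat)) : Int)
            = (((i + j + 1 + k : Nat)) : Int) := by
          rw [hfp, hfi]
        rw [he]
        have hne : ((((i + j + 1 + k : Nat)) : Int) == W) = false := by
          have : ((i + j + 1 + k : Nat) : Int) < W := by
            rw [← hW]; exact_mod_cast hkw
          simp; omega
        rw [hne]
        simp only [Bool.false_eq_true, if_false]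
        -- machine: walk the non-positive prefix, then close the eye
        have hsufdec : window.drop (i + j + 1)
            = (window.drop (i + j + 1)).take k
              ++ ((window.drop (i + j + 1))[k]'(by omega)) :: (window.drop (i + j + 1)).drop (k + 1) := by
          conv_lhs => rw [← List.take_append_drop k (window.drop (i + j + 1))]
          congr 1
          exact (List.getElem_cons_drop (by omega)).symm
        have htaknp : ∀ x ∈ (window.drop (i + j + 1)).take k, ¬ (0:Int) < x := by
          intro x hx
          obtain ⟨m, hm, hxm⟩ := List.mem_iff_getElem.mp hx
          have hmk : m < k := by
            have := hm; simp [List.length_take] at this; omega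
          rw [List.getElem_take] at hxm
          exact hxm ▸ hkmin m hmk
        have hlentake : ((window.drop (i + j + 1)).take k).length = k := by
          rw [List.length_take]
          omega
        rw [hsufdec, pvRec_skip_nonpos _ _ _ htaknp, hlentake]
        rw [pvRec, if_neg (by
            intro hc
            have := hc.1
            omega), if_pos ⟨hkp, rfl⟩]
        have harg : ((((i + j + 1 : Nat)) : Int) + (k : Nat)) = (((i + j + 1 + k : Nat)) : Int) := by
          push_cast; ring
        have hdropeq : (window.drop (i + j + 1)).drop (k + 1)
            = window.drop ((((i + j + 1 + k : Nat)) : Int).toNat + 1) := by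
          rw [List.drop_drop]
          try congr 1
          try omega
        have hrec := ih ((((i + j + 1 + k : Nat)) : Int).toNat + 1) (((i + j : Nat)) : Int) (by omega)
        rw [harg, hstart, hrec, ← hdropeq,
          show ((((i + j + 1 + k : Nat)) : Int) + 1)
            = ((((((i + j + 1 + k : Nat)) : Int).toNat + 1 : Nat)) : Int) by omega]
        try rfl

-- ---------- the emissions and finalizers agree except on D_'s region ----------

theorem pvEmit_eq_of_ne (W s : Int) (hs : s ≠ 0) : pvEmitA W s = pvEmitB W s := by
  funext es e
  simp only [pvEmitA, pvEmitB, pvAdjEye, pvCentered, if_pos hs]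
  try rfl

theorem pvEmit_eq_zero (W : Int) (s' e : Int) (h1 : 0 ≤ s') (h2 : s' < e) :
    pvEmitA W 0 s' e = pvEmitB W 0 s' e := by
  simp only [pvEmitA, pvEmitB, pvAdjEye, pvCentered]
  have hfd : 0 ≤ PySem.Int.floordiv (e - s') 2 := by
    rw [PySem.Int.floordiv_eq_ediv_of_pos (by omega)]
    omega
  rw [if_neg (by omega : ¬ (0:Int) ≠ 0)]
  rw [if_neg (by omega : ¬ s' + PySem.Int.floordiv (e - s') 2 - 0 < 0)]
  congr 1
  omega

theorem pvFin_eq_zero (W : Int) (s' : Int) (h1 : 0 ≤ s') (h2 : s' < W) :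
    pvFinA W s' = pvFinB W 0 s' := by
  simp only [pvFinA, pvFinB, pvCentered]
  have hfd : 0 ≤ PySem.Int.floordiv (W - s') 2 := by
    rw [PySem.Int.floordiv_eq_ediv_of_pos (by omega)]
    omega
  rw [if_neg (by omega : ¬ s' + PySem.Int.floordiv (W - s') 2 - 0 < 0)]
  congr 1
  omega

theorem pvFin_eq_width (W : Int) (s' : Int) (h1 : 0 ≤ s') (h2 : s' < W) :
    pvFinA W s' = pvFinB W W s' := by
  simp only [pvFinA, pvFinB, pvCentered]
  have hfd : PySem.Int.floordiv (W - s') 2 < W - s' := by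
    rw [PySem.Int.floordiv_eq_ediv_of_pos (by omega)]
    omega
  rw [if_pos (by omega : s' + PySem.Int.floordiv (W - s') 2 - W < 0)]
  congr 1
  omega

theorem pvFin_ne (W s : Int) (hs : s ≠ 0) (hsw : s ≠ W) (s' : Int) :
    pvFinA W s' ≠ pvFinB W s s' := by
  simp only [pvFinA, pvFinB, pvCentered]
  intro h
  have h1 := List.head_eq_of_cons_eq h
  by_cases hneg : s' + PySem.Int.floordiv (W - s') 2 - s < 0
  · rw [if_pos hneg] at h1
    omega
  · rw [if_neg hneg] at h1
    omega

-- ---------- preamble bridges ----------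

theorem pvFindShift_eq (ys : List Int) :
    ∀ (k : Int), (∃ x ∈ ys, x ≠ 0) →
      (PySem.List.enumerate ys k).findSome? (fun p => if p.2 ≠ 0 then some p.1 else none)
        = some (k + ((ys.takeWhile (fun x => x == 0)).length : Int)) := by
  induction ys with
  | nil => intro k h; simp at h
  | cons y t ih =>
    intro k h
    rw [PySem.List.enumerate_cons, List.findSome?_cons]
    by_cases hy : y = 0
    · subst hy
      simp only [ne_eq, not_true_eq_false, if_false]
      have ht : ∃ x ∈ t, x ≠ 0 := by
        rcases h with ⟨x, hx, hxne⟩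
        rcases List.mem_cons.mp hx with h' | h'
        · exact absurd h' hxne
        · exact ⟨x, h', hxne⟩
      rw [ih (k + 1) ht]
      congr 1
      rw [List.takeWhile_cons, if_pos (by simp)]
      simp
      ring
    · rw [if_pos hy]
      rw [List.takeWhile_cons, if_neg (by simpa using hy)]
      simp

theorem pvPrep_rolled (scan : List Int) (a : Int) (t0 : List Int)
    (hscan : scan = a :: t0) (ha : a = 0) (hnz : ∃ x ∈ scan, x ≠ 0) :
    pvPrep scan true = ((pvTrail scan : Int),
      scan.drop (scan.length - pvTrail scan) ++ scan.take (scan.length - pvTrail scan)) := by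
  have hcond : (true && ((PySem.List.pyGet? scan 0).getD 0 == 0)) = true := by
    rw [hscan, ha]
    simp [PySem.List.pyGet?_zero_cons]
  have hnzrev : ∃ x ∈ scan.reverse, x ≠ 0 := by
    rcases hnz with ⟨x, hx, hxne⟩
    exact ⟨x, List.mem_reverse.mpr hx, hxne⟩
  have hs := pvFindShift_eq scan.reverse 0 hnzrev
  rw [pvPrep, if_pos hcond]
  have htr : ((scan.reverse.takeWhile (fun x => x == 0)).length : Int) = (pvTrail scan : Int) := by
    rw [pvTrail]
  rw [hs]
  simp only [zero_add, Option.getD_some, htr]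
  have htle : pvTrail scan ≤ scan.length := by
    rw [pvTrail]
    calc (scan.reverse.takeWhile (fun x => x == 0)).length
        ≤ scan.reverse.length := (List.takeWhile_sublist _).length_le
      _ = scan.length := List.length_reverse
  congr 1
  rcases Nat.eq_zero_or_pos (pvTrail scan) with hpt | hpos
  · rw [hpt]
    rw [show (-1 : Int) * ((0 : Nat) : Int) = ((0:Nat) : Int) by simp]
    rw [PySem.List.slice_from_natCast scan 0, PySem.List.slice_to_natCast scan 0]
    simp
  · rw [show (-1 : Int) * ((pvTrail scan : Nat) : Int) = -((pvTrail scan : Nat) : Int) by ring]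
    rw [PySem.List.slice_from_neg_natCast scan (pvTrail scan) (by omega),
        PySem.List.slice_to_neg_natCast scan (pvTrail scan) (by omega)]

theorem pvMap_eq_take (ys : List Int) (W : Int) (h : W ≤ (ys.length : Int)) :
    (PySem.List.pyRange 0 W 1).map (fun i => PySem.List.pyGetD ys i 0) = ys.take W.toNat := by
  apply List.ext_getElem
  · simp [PySem.List.length_pyRange_one]
    omega
  · intro k h1 h2
    simp only [List.getElem_map, PySem.List.getElem_pyRange_one, List.getElem_take]
    have hk : k < W.toNat := by
      simp [PySem.List.length_pyRange_one] at h1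
      omega
    have hkl : k < ys.length := by omega
    rw [show ((0:Int) + (k : Int)) = ((k : Nat) : Int) by push_cast; ring]
    simp [PySem.List.pyGetD_natCast, List.getD_eq_getElem?_getD, List.getElem?_eq_getElem hkl]

-- ===== VERDICT helper: the main agreement theorem =====

theorem pv_main (scan : List Int) (width : Int) (wrap : Bool)
    (hPre : Pre_process_eyescan_rxclk scan width wrap)
    (hnD : ¬ D_process_eyescan_rxclk scan width wrap) :
    process_eyescan_rxclk scan width wrap = process_eyescan_rxclk_alt scan width wrap := by
  obtain ⟨hwlen, hwrapcond⟩ := hPre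
  have hcons : scan ≠ [] → ∃ a t0, scan = a :: t0 := by
    cases scan with
    | nil => intro h; exact absurd rfl h
    | cons a t0 => intro _; exact ⟨a, t0, rfl⟩
  -- what the preamble produces
  have hcase : (pvPrep scan wrap).1 = 0 ∨ (wrap = true ∧ scan.head? = some 0 ∧
      ((pvPrep scan wrap).1 = (pvTrail scan : Int)
        ∧ (pvPrep scan wrap).2 = scan.drop (scan.length - pvTrail scan)
            ++ scan.take (scan.length - pvTrail scan))) := by
    cases hw : wrap with
    | false =>
      left
      simp [pvPrep]
    | true =>
      by_cases hhead : scan.head? = some 0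
      · have hnz := (hwrapcond hw).2 hhead
        obtain ⟨a, t0, hscan⟩ := hcons ((hwrapcond hw).1)
        have ha : a = 0 := by
          have h2 := hhead
          rw [hscan] at h2
          simpa using h2
        have hroll := pvPrep_rolled scan a t0 hscan ha hnz
        exact Or.inr ⟨rfl, hhead, congrArg Prod.fst hroll, congrArg Prod.snd hroll⟩
      · left
        obtain ⟨a, t0, hscan⟩ := hcons ((hwrapcond hw).1)
        have ha : a ≠ 0 := fun h => hhead (by rw [hscan, h]; rfl)
        rw [hscan]
        simp [pvPrep, PySem.List.pyGet?_zero_cons, ha]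
  set p := pvPrep scan wrap with hp
  have hA : process_eyescan_rxclk scan width wrap
      = pvRec (pvEmitA width p.1) (pvFinA width)
          ((PySem.List.pyRange 0 width 1).map (fun i => PySem.List.pyGetD p.2 i 0)) 0 false 0 := by
    rw [process_eyescan_rxclk]
    exact pvA_eq width p.1 p.2
  set window := (PySem.List.pyRange 0 width 1).map (fun i => PySem.List.pyGetD p.2 i 0) with hwin
  by_cases hwpos : width ≤ 0
  · have hnil : window = [] := by
      rw [hwin, PySem.List.pyRange_one_eq_nil hwpos]
      simp
    rw [hA, process_eyescan_rxclk_alt, ← hp, ← hwin, hnil]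
    simp [pvRec, pvLoopB]
  · have hlenw : (window.length : Int) = width := by
      rw [hwin]
      simp [PySem.List.length_pyRange_one]
      omega
    have hB : process_eyescan_rxclk_alt scan width wrap
        = pvRec (pvEmitB width p.1) (pvFinB width p.1) window 0 false 0 := by
      rw [process_eyescan_rxclk_alt, ← hp, ← hwin]
      have := pvLoopB_eq width p.1 window hlenw (window.length + 1) 0 0 (by omega)
      rw [this]
      simp
    rw [hA, hB]
    have hzero_case : p.1 = 0 →
        pvRec (pvEmitA width p.1) (pvFinA width) window 0 false 0
          = pvRec (pvEmitB width p.1) (pvFinB width p.1) window 0 false 0 := by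
      intro hz
      rw [hz]
      apply pvRec_congr
      · intro h; exact absurd h (by simp)
      · intro s' e h1 h2 h3
        exact pvEmit_eq_zero width s' e h1 h2
      · intro s' h1 h2
        apply pvFin_eq_zero width s' h1
        simp only [zero_add] at h2
        omega
    rcases hcase with hz | ⟨hw, hhead, hs, hroll⟩
    · exact hzero_case hz
    · -- rolled case: window is D_'s window
      have hrolllen : (p.2.length : Int) = (scan.length : Int) := by
        rw [hroll]
        have : pvTrail scan ≤ scan.length := by
          rw [pvTrail]
          calc (scan.reverse.takeWhile (fun x => x == 0)).length
              ≤ scan.reverse.length := (List.takeWhile_sublist _).length_le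
            _ = scan.length := List.length_reverse
        simp
        try omega
      have hwinD : window = pvWindowD scan width := by
        rw [hwin, pvMap_eq_take p.2 width (by omega), pvWindowD, hroll]
      by_cases ht0 : pvTrail scan = 0
      · apply hzero_case
        rw [hs, ht0]
        try rfl
      · by_cases htw : (pvTrail scan : Int) = width
        · rw [hs, htw]
          have hsne : width ≠ 0 := by omega
          rw [pvEmit_eq_of_ne width width hsne]
          apply pvRec_congr
          · intro h; exact absurd h (by simp)
          · intro s' e h1 h2 h3; rfl
          · intro s' h1 h2
            apply pvFin_eq_width width s' h1
            simp only [zero_add] at h2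
            omega
        · -- last possibility: the window must NOT end inside an eye
          have hfind : ¬ ((pvWindowD scan width).reverse.find? (fun v => decide ((0:Int) ≤ v)) = some 0) := by
            intro hc
            exact hnD ⟨hw, hhead, ht0, htw, hc⟩
          have hflag : pvEndFlag window false = false := by
            rw [pvEndFlag_eq_find, hwinD]
            cases hfi : (pvWindowD scan width).reverse.find? (fun v => decide ((0:Int) ≤ v)) with
            | none => rfl
            | some v =>
              have hvne : v ≠ 0 := fun hv => hfind (hv ▸ hfi)
              simp [hvne]
          have hsne : p.1 ≠ 0 := by
            rw [hs]
            exact_mod_cast fun hc => ht0 (by exact_mod_cast hc)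
          rw [pvEmit_eq_of_ne width p.1 hsne]
          exact pvRec_fin_irrel _ _ _ window false 0 0 hflag

-- ===== VERDICT (by name: the statements are the Claim_ definitions above) =====
theorem process_eyescan_rxclk_spec : Claim_unchanged_process_eyescan_rxclk := by
  intro scan width wrap _ hPre
  intro hnD
  exact (pv_main scan width wrap hPre hnD).symm ▸ rfl

theorem process_eyescan_rxclk_changed : Claim_changed_process_eyescan_rxclk := by
  unfold Claim_changed_process_eyescan_rxclk; decide

theorem process_eyescan_rxclk_tight : Claim_exact_process_eyescan_rxclk := by
  intro scan width wrap _ hPre hD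
  obtain ⟨hw, hhead, ht0, htw, hfind⟩ := hD
  obtain ⟨hwlen, hwrapcond⟩ := hPre
  have hnz := (hwrapcond hw).2 hhead
  obtain ⟨a, t0, hscan⟩ : ∃ a t0, scan = a :: t0 := by
    cases scan with
    | nil => exact absurd rfl ((hwrapcond hw).1)
    | cons a t0 => exact ⟨a, t0, rfl⟩
  have ha : a = 0 := by
    have h2 := hhead
    rw [hscan] at h2
    simpa using h2
  have hroll0 := pvPrep_rolled scan a t0 hscan ha hnz
  rw [hw]
  set p := pvPrep scan true with hp
  have hs : p.1 = (pvTrail scan : Int) := congrArg Prod.fst hroll0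
  have hroll : p.2 = scan.drop (scan.length - pvTrail scan)
      ++ scan.take (scan.length - pvTrail scan) := congrArg Prod.snd hroll0
  have hA : process_eyescan_rxclk scan width true
      = pvRec (pvEmitA width p.1) (pvFinA width)
          ((PySem.List.pyRange 0 width 1).map (fun i => PySem.List.pyGetD p.2 i 0)) 0 false 0 := by
    rw [process_eyescan_rxclk]
    exact pvA_eq width p.1 p.2
  set window := (PySem.List.pyRange 0 width 1).map (fun i => PySem.List.pyGetD p.2 i 0) with hwin
  have hwpos : 0 < width := by
    by_contra hle
    have : pvWindowD scan width = [] := by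
      rw [pvWindowD]
      have : width.toNat = 0 := by omega
      rw [this]
      simp
    rw [this] at hfind
    simp at hfind
  have hlenw : (window.length : Int) = width := by
    rw [hwin]
    simp [PySem.List.length_pyRange_one]
    omega
  have hB : process_eyescan_rxclk_alt scan width true
      = pvRec (pvEmitB width p.1) (pvFinB width p.1) window 0 false 0 := by
    rw [process_eyescan_rxclk_alt, ← hp, ← hwin]
    have := pvLoopB_eq width p.1 window hlenw (window.length + 1) 0 0 (by omega)
    rw [this]
    simp
  have hrolllen : (p.2.length : Int) = (scan.length : Int) := by
    rw [hroll]
    have : pvTrail scan ≤ scan.length := by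
      rw [pvTrail]
      calc (scan.reverse.takeWhile (fun x => x == 0)).length
          ≤ scan.reverse.length := (List.takeWhile_sublist _).length_le
        _ = scan.length := List.length_reverse
    simp
    try omega
  have hwinD : window = pvWindowD scan width := by
    rw [hwin, pvMap_eq_take p.2 width (by omega), pvWindowD, hroll]
  have hflag : pvEndFlag window false = true := by
    rw [pvEndFlag_eq_find, hwinD, hfind]
    simp
  have hsne : p.1 ≠ 0 := by
    rw [hs]
    exact_mod_cast fun hc => ht0 (by exact_mod_cast hc)
  have hsnw : p.1 ≠ width := by
    rw [hs]
    exact htw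
  obtain ⟨es', L, hL⟩ := pvRec_last (pvEmitB width p.1) window false 0 0 hflag
  rw [hA, hB, pvEmit_eq_of_ne width p.1 hsne, hL (pvFinA width), hL (pvFinB width p.1)]
  intro hEq
  have h1 : pvFinA width es' = pvFinB width p.1 es' := by
    have := List.append_cancel_left hEq
    simpa using this
  exact pvFin_ne width p.1 hsne hsnw es' h1
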